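-- pv_equiv track=rewrite | github.com/PromyLOPh/crocoite | crocoite/irc.py | parseMode
-- ===== SOURCE A (Python) =====
-- def parseMode (mode):
--     """ Parse mode strings like +a, -b, +a-b, -b+a, … """
--     action = '+'
--     ret = []
--     for c in mode:
--         if c in {'+', '-'}:
--             action = c
--         else:
--             ret.append ((action, c))
--     return ret
-- ===== SOURCE B (Python) =====
-- def parseMode (mode):
--     """ Parse mode strings like +a, -b, +a-b, -b+a, … """
--     def run_split(chars):
--         # split chars into (run before the next sign, rest starting at that sign)
--         for j, c in enumerate(chars):
--             if c in '+-':
--                 return chars[:j], chars[j:]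
--         return chars, []
--
--     def go(sign, chars):
--         run, rest = run_split(chars)
--         out = [(sign, c) for c in run]
--         if rest:
--             out += go(rest[0], rest[1:])
--         return out
--
--     return go('+', list(mode))
-- ===== Notes on version B (the rewrite author's own statement) =====
-- stated objective: alternative
-- what changed: Replaces A's single stateful char-by-char scan (carrying the current action across the loop) with a two-level group-then-flatten decomposition: split the string into sign-delimited runs, then emit (sign, char) pairs per run via recursion on the runs.
import Mathlib
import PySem

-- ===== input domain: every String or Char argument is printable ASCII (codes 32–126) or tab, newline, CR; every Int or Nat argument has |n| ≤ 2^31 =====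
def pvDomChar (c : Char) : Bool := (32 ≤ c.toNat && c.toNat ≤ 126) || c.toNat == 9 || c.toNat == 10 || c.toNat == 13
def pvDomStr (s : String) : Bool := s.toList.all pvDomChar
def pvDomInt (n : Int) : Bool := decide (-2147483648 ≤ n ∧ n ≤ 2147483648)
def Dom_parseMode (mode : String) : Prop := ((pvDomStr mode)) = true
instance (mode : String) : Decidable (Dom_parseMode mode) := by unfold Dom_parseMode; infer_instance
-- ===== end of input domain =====

-- B replaces A's single stateful char-by-char scan with a group-then-flatten
-- decomposition (split into sign-delimited runs, then emit pairs per run);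
-- same O(n) cost, alternative structure.


-- ===== PORT A =====
-- A: fold over the characters keeping (current action, accumulated list)
def parseModeStep (st : String × List (String × String)) (c : Char) :
    String × List (String × String) :=
  if c = '+' ∨ c = '-' then (String.ofList [c], st.2)
  else (st.1, st.2 ++ [(st.1, String.ofList [c])])

def parseMode (mode : String) : List (String × String) :=
  (mode.toList.foldl parseModeStep ("+", [])).2

-- ===== PORT B =====
-- B helper: split chars into (run before the next sign, rest starting at that sign)
def runSplit : List Char → List Char × List Char
  | [] => ([], [])
  | c :: cs =>
    if c = '+' ∨ c = '-' then ([], c :: cs)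
    else
      let p := runSplit cs
      (c :: p.1, p.2)

theorem runSplit_rest_le : ∀ (cs : List Char), (runSplit cs).2.length ≤ cs.length
  | [] => Nat.le_refl _
  | c :: cs => by
    unfold runSplit
    split
    · exact Nat.le_refl _
    · exact Nat.le_succ_of_le (runSplit_rest_le cs)

-- B: emit pairs for the current run, then recurse on the remaining runs
def parseModeGo (sign : Char) (chars : List Char) : List (String × String) :=
  let p := runSplit chars
  (p.1.map (fun c => (String.ofList [sign], String.ofList [c]))) ++
    (if h : p.2 = [] then [] else parseModeGo (p.2.head h) p.2.tail)
termination_by chars.length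
decreasing_by
  have := runSplit_rest_le chars
  cases hp : (runSplit chars).2 with
  | nil => exact absurd hp h
  | cons x xs => rw [hp] at this; simp; simp only [List.length_cons] at this; omega

def parseMode_alt (mode : String) : List (String × String) :=
  parseModeGo '+' mode.toList

-- ===== PRECONDITION & SPEC =====
def Spec_parseMode (mode : String) (out : List (String × String)) : Prop := out = parseMode_alt mode
instance (mode : String) (out : List (String × String)) : Decidable (Spec_parseMode mode out) := by unfold Spec_parseMode; infer_instance

-- ===== CLAIM (what is proved, stated in full; the proofs are below) =====
def Claim_equal_parseMode : Prop := ∀ (mode : String), Dom_parseMode mode → Spec_parseMode mode (parseMode mode)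

-- ===== LEMMAS AND PROOFS =====
theorem parseModeGo_sign (s c : Char) (cs : List Char) (h : c = '+' ∨ c = '-') :
    parseModeGo s (c :: cs) = parseModeGo c cs := by
  rw [parseModeGo.eq_def]
  simp [runSplit, h]

theorem parseModeGo_nosign (s c : Char) (cs : List Char) (h : ¬ (c = '+' ∨ c = '-')) :
    parseModeGo s (c :: cs) =
      (String.ofList [s], String.ofList [c]) :: parseModeGo s cs := by
  conv_lhs => rw [parseModeGo.eq_def]
  conv_rhs => rw [parseModeGo.eq_def]
  simp only [runSplit, if_neg h]
  rfl

theorem foldl_eq_go (cs : List Char) : ∀ (s : Char) (acc : List (String × String)),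
    (cs.foldl parseModeStep (String.ofList [s], acc)).2 = acc ++ parseModeGo s cs := by
  induction cs with
  | nil => intro s acc; rw [parseModeGo.eq_def]; simp [runSplit]
  | cons c cs ih =>
    intro s acc
    by_cases h : c = '+' ∨ c = '-'
    · rw [parseModeGo_sign s c cs h]
      simp only [List.foldl_cons, parseModeStep, if_pos h]
      exact ih c acc
    · rw [parseModeGo_nosign s c cs h]
      simp only [List.foldl_cons, parseModeStep, if_neg h]
      rw [ih s (acc ++ [(String.ofList [s], String.ofList [c])])]
      simp

-- ===== VERDICT (by name: the statement is the Claim_ definition above) =====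
theorem parseMode_spec : Claim_equal_parseMode := by
  intro mode _
  unfold Spec_parseMode parseMode parseMode_alt
  have h := foldl_eq_go mode.toList '+' []
  simpa using h
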